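-- pv_equiv track=rewrite | github.com/MrBrantCode/unitest_baseline | mut_generate/mist_train_taco/taco_2281/solution.py | max_utility_sum
-- ===== SOURCE A (Python) =====
-- def max_utility_sum(N, K, ABs):
--     if not ABs:
--         return 0
--
--     ansK = sum((b for (a, b) in ABs if K | a == K))
--     pool = []
--
--     for i in range(30, -1, -1):
--         if K & (1 << i):
--             pool.append(i)
--
--     for p in pool:
--         v = 1 << p
--         KK = K >> p << p
--         KKK = K >> p
--         t = sum((b for (a, b) in ABs if not a & v and (a | KK) >> p == KKK))
--         if t > ansK:
--             ansK = t
--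
--     return ansK
-- ===== SOURCE B (Python) =====
-- def max_utility_sum(N, K, ABs):
--     # One pass over ABs: build ansK and a per-bit partial-sum table in parallel,
--     # then take the max at the end (A rescans ABs once per set bit of K).
--     if not ABs:
--         return 0
--     pool = [i for i in range(30, -1, -1) if K & (1 << i)]
--     ansK = 0
--     sums = [0] * len(pool)
--     for a, b in ABs:
--         if K | a == K:
--             ansK += b
--         sums = [s + b if (not a & (1 << p) and (a | (K >> p << p)) >> p == K >> p) else s
--                 for s, p in zip(sums, pool)]
--     best = ansK
--     for t in sums:
--         if t > best:
--             best = t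
--     return best
-- ===== Notes on version B (the rewrite author's own statement) =====
-- stated objective: alternative
-- what changed: A rescans ABs once per set bit of K (up to 31 extra passes, each recomputing a conditional sum); B makes a single pass over ABs maintaining ansK and a parallel per-bit partial-sum table, then takes the max of ansK and the table entries.
import Mathlib
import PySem

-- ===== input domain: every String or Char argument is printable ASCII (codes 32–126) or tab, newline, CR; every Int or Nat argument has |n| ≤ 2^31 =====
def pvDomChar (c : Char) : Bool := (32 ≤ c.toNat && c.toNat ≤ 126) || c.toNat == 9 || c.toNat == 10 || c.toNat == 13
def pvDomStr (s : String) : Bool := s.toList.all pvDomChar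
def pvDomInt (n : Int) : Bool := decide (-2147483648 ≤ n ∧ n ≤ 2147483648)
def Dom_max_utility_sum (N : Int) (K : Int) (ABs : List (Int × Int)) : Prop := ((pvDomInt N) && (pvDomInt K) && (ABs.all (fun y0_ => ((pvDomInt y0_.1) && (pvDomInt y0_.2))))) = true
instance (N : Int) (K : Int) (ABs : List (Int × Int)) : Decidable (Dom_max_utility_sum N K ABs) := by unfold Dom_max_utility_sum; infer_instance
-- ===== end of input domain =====

-- B replaces A's per-set-bit rescans of ABs with a single pass that maintains ansK and a
-- per-bit partial-sum table in parallel, followed by one final max sweep (objective: alternative).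


-- ===== PORT A =====
-- pool elements come from range(30,-1,-1), hence are nonnegative: '.toNat' on a shift
-- amount is exact here (Python shift counts are nonnegative in this program).
def max_utility_sum (N : Int) (K : Int) (ABs : List (Int × Int)) : Int :=
  if ABs.isEmpty then 0
  else
    let ansK := ABs.foldl (fun s ab => if PySem.Int.bor K ab.1 == K then s + ab.2 else s) 0
    let pool := (PySem.List.pyRange 30 (-1) (-1)).filter
      (fun i => !(PySem.Int.band K ((1 : Int) <<< i.toNat) == 0))
    pool.foldl (fun ansK p =>
      let v : Int := (1 : Int) <<< p.toNat
      let KK : Int := (K >>> p.toNat) <<< p.toNat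
      let KKK : Int := K >>> p.toNat
      let t := ABs.foldl (fun s ab =>
        if (PySem.Int.band ab.1 v == 0) && ((PySem.Int.bor ab.1 KK) >>> p.toNat == KKK)
        then s + ab.2 else s) 0
      if t > ansK then t else ansK) ansK

-- ===== PORT B =====
def max_utility_sum_alt (N : Int) (K : Int) (ABs : List (Int × Int)) : Int :=
  if ABs.isEmpty then 0
  else
    let pool := (PySem.List.pyRange 30 (-1) (-1)).filter
      (fun i => !(PySem.Int.band K ((1 : Int) <<< i.toNat) == 0))
    let st := ABs.foldl (fun (st : Int × List Int) ab =>
        (if PySem.Int.bor K ab.1 == K then st.1 + ab.2 else st.1,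
         List.zipWith (fun s p =>
           if (PySem.Int.band ab.1 ((1 : Int) <<< p.toNat) == 0) &&
              ((PySem.Int.bor ab.1 ((K >>> p.toNat) <<< p.toNat)) >>> p.toNat == K >>> p.toNat)
           then s + ab.2 else s) st.2 pool))
      (0, List.replicate pool.length 0)
    st.2.foldl (fun best t => if t > best then t else best) st.1

-- ===== PRECONDITION & SPEC =====
def Spec_max_utility_sum (N : Int) (K : Int) (ABs : List (Int × Int)) (out : Int) : Prop := out = max_utility_sum_alt N K ABs
instance (N : Int) (K : Int) (ABs : List (Int × Int)) (out : Int) : Decidable (Spec_max_utility_sum N K ABs out) := by unfold Spec_max_utility_sum; infer_instance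

-- ===== CLAIM (what is proved, stated in full; the proofs are below) =====
def Claim_equal_max_utility_sum : Prop := ∀ (N : Int) (K : Int) (ABs : List (Int × Int)), Dom_max_utility_sum N K ABs → Spec_max_utility_sum N K ABs (max_utility_sum N K ABs)

-- ===== LEMMAS AND PROOFS =====

-- the two membership conditions, as A and B both test them
def pvCondK (K : Int) (ab : Int × Int) : Bool := PySem.Int.bor K ab.1 == K
def pvCondP (K p : Int) (ab : Int × Int) : Bool :=
  (PySem.Int.band ab.1 ((1 : Int) <<< (p.toNat : Int)) == 0) &&
    ((PySem.Int.bor ab.1 ((K >>> (p.toNat : Int)) <<< (p.toNat : Int))) >>> (p.toNat : Int)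
      == K >>> (p.toNat : Int))

-- the mathematical sum both programs compute per condition
def pvSum (c : Int × Int → Bool) (l : List (Int × Int)) : Int :=
  (l.map (fun ab => if c ab then ab.2 else 0)).sum

theorem pvSum_cons (c : Int × Int → Bool) (ab : Int × Int) (rest : List (Int × Int)) :
    pvSum c (ab :: rest) = (if c ab then ab.2 else 0) + pvSum c rest := by
  simp [pvSum]

theorem pvFoldl_if_eq_sum (c : Int × Int → Bool) (l : List (Int × Int)) (acc : Int) :
    l.foldl (fun s ab => if c ab then s + ab.2 else s) acc = acc + pvSum c l := by
  have h : (fun (s : Int) ab => if c ab then s + ab.2 else s)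
      = (fun s ab => s + (if c ab then ab.2 else 0)) := by
    funext s ab; split <;> simp
  rw [h, PySem.List.foldl_add]; rfl

theorem pvZipWith_id {α β : Type} (l1 : List α) (l2 : List β) (h : l1.length ≤ l2.length) :
    List.zipWith (fun a _ => a) l1 l2 = l1 := by
  induction l1 generalizing l2 with
  | nil => simp
  | cons a t ih =>
    cases l2 with
    | nil => simp at h
    | cons b t2 => simp only [List.zipWith_cons_cons, List.cons.injEq, true_and]
                   exact ih t2 (by simpa using h)

theorem pvZipWith_fusion {α β γ : Type} (f : γ → β → γ) (g : α → β → γ)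
    (l1 : List α) (l2 : List β) :
    List.zipWith f (List.zipWith g l1 l2) l2 = List.zipWith (fun a b => f (g a b) b) l1 l2 := by
  induction l1 generalizing l2 with
  | nil => simp
  | cons a t ih =>
    cases l2 with
    | nil => simp
    | cons b t2 => simp [ih]

theorem pvZipWith_replicate (f : Int → Int → Int) (l : List Int) :
    List.zipWith f (List.replicate l.length 0) l = l.map (f 0) := by
  induction l with
  | nil => simp
  | cons a t ih => simp [List.replicate_succ, ih]

theorem pvFoldB (K : Int) (ABs : List (Int × Int)) (pool : List Int) :
    ∀ (acc : Int) (sums0 : List Int), sums0.length = pool.length →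
    ABs.foldl (fun (st : Int × List Int) ab =>
        (if PySem.Int.bor K ab.1 == K then st.1 + ab.2 else st.1,
         List.zipWith (fun s p =>
           if (PySem.Int.band ab.1 ((1 : Int) <<< p.toNat) == 0) &&
              ((PySem.Int.bor ab.1 ((K >>> p.toNat) <<< p.toNat)) >>> p.toNat == K >>> p.toNat)
           then s + ab.2 else s) st.2 pool)) (acc, sums0)
      = (acc + pvSum (pvCondK K) ABs,
         List.zipWith (fun s p => s + pvSum (pvCondP K p) ABs) sums0 pool) := by
  induction ABs with
  | nil =>
    intro acc sums0 h
    simp only [List.foldl_nil, pvSum, List.map_nil, List.sum_nil, add_zero]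
    exact congrArg _ (pvZipWith_id sums0 pool (le_of_eq h)).symm
  | cons ab rest ih =>
    intro acc sums0 h
    simp only [List.foldl_cons]
    rw [ih _ _ (by simp [h])]
    rw [Prod.mk.injEq]
    refine ⟨?_, ?_⟩
    · unfold pvCondK
      rw [pvSum_cons]
      by_cases hc : PySem.Int.bor K ab.1 == K
      · rw [if_pos hc, if_pos hc]; ring
      · rw [if_neg hc, if_neg hc]; ring
    · rw [pvZipWith_fusion]
      congr 1
      funext s p
      unfold pvCondP
      rw [pvSum_cons]
      by_cases hc : (PySem.Int.band ab.1 ((1 : Int) <<< (p.toNat : Int)) == 0) &&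
          ((PySem.Int.bor ab.1 ((K >>> (p.toNat : Int)) <<< (p.toNat : Int))) >>> (p.toNat : Int)
            == K >>> (p.toNat : Int))
      · rw [if_pos hc, if_pos hc]; ring
      · rw [if_neg hc, if_neg hc]; ring

-- ===== VERDICT (by name: the statement is the Claim_ definition above) =====
theorem max_utility_sum_spec : Claim_equal_max_utility_sum := by
  intro N K ABs _
  unfold Spec_max_utility_sum max_utility_sum max_utility_sum_alt
  by_cases hE : ABs.isEmpty
  · simp [hE]
  · simp only [Bool.not_eq_true] at hE
    simp only [hE, Bool.false_eq_true, if_false]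
    set pool := (PySem.List.pyRange 30 (-1) (-1)).filter
      (fun i => !(PySem.Int.band K ((1 : Int) <<< i.toNat) == 0)) with hpool
    rw [pvFoldB K ABs pool 0 (List.replicate pool.length 0) (by simp)]
    simp only [pvZipWith_replicate, zero_add]
    rw [List.foldl_map]
    have hA : List.foldl (fun s ab => if PySem.Int.bor K ab.1 == K then s + ab.2 else s) 0 ABs
        = pvSum (pvCondK K) ABs := by
      rw [pvFoldl_if_eq_sum, zero_add]; rfl
    rw [hA]
    congr 1
    funext m p
    rw [pvFoldl_if_eq_sum, zero_add]
    rfl
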